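-- pv_equiv track=rewrite | github.com/agucova/cs42 | rúbricas/i1/costear.py | costo
-- ===== SOURCE A (Python) =====
-- def costo(m):
--     # Un conjunto es apropiado para almacenar el largo del tramo
--     tramos = set()
--     # El largo de un tramo determinado
--     tramo = 0
--     # Por cada caracteres en el muro
--     for char in m:
--         # Si no es un P o V
--         if char not in ("P", "V"):
--             # Añade uno al contador de longitud
--             tramo += 1
--         else:
--             # Añade el largo del tramo al conjunto
--             tramos.add(tramo)
--             tramo = 0
--     # La función max returna el máximo en una lista o conjunto de números, esto nos permite determinar el tramo mas largo del set.
--     mayor_tramo = max(tramos)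
--     return 10 * mayor_tramo
-- ===== SOURCE B (Python) =====
-- def costo(m):
--     # Positions of the P/V delimiters; each free stretch is the gap between
--     # consecutive delimiters (with a virtual delimiter at position -1).
--     idxs = [i for i, c in enumerate(m) if c in "PV"]
--     return 10 * max(i - prev - 1 for prev, i in zip([-1] + idxs, idxs))
-- ===== Notes on version B (the rewrite author's own statement) =====
-- stated objective: alternative
-- what changed: Replaces A's incremental count-and-reset scan that accumulates stretch lengths in a set with delimiter-position arithmetic: collect the indices of 'P'/'V' characters and take 10 times the maximum gap between consecutive delimiter positions (with a virtual delimiter before the start).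
import Mathlib
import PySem

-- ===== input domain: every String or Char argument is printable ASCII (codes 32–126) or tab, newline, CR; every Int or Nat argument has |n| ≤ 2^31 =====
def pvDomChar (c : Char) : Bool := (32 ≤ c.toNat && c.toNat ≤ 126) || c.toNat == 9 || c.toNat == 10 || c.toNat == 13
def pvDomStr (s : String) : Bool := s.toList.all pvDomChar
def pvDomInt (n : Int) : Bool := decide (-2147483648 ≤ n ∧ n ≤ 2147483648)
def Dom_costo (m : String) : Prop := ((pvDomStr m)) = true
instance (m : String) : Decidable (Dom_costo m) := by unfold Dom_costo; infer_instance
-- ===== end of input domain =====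

-- B replaces A's count-and-reset scan over characters by delimiter-position arithmetic:
-- collect the indices of the P/V delimiters and take the maximum gap between consecutive ones
-- (objective: alternative decomposition, same cost).

-- ===== PORT A =====
-- one step of A's loop body: non-delimiter extends the current stretch, a delimiter
-- records its length in the set and resets the counter
def costoStep (st : PySem.Set Int × Int) (c : Char) : PySem.Set Int × Int :=
  if ¬ (c = 'P' ∨ c = 'V') then (st.1, st.2 + 1)
  else (PySem.Set.add st.1 st.2, 0)

def costo (m : String) : Int :=
  let st := m.toList.foldl costoStep (PySem.Set.empty, 0)
  match PySem.List.max? st.1 (fun x => x) with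
  | some v => 10 * v
  | none => 0      -- unreachable under Pre_costo: Python's max([]) raises ValueError

-- ===== PORT B =====
def costo_alt (m : String) : Int :=
  -- idxs = [i for i, c in enumerate(m) if c in "PV"]
  let idxs : List Int :=
    ((PySem.List.enumerate m.toList 0).filter
      (fun p => p.2 == 'P' || p.2 == 'V')).map (fun p => p.1)
  -- gaps between consecutive delimiters, with a virtual delimiter at -1
  let gaps : List Int := (((-1 : Int) :: idxs).zip idxs).map (fun p => p.2 - p.1 - 1)
  match PySem.List.max? gaps (fun x => x) with
  | some v => 10 * v
  | none => 0      -- unreachable under Pre_costo: Python's max of an empty generator raises ValueError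

-- ===== PRECONDITION & SPEC =====
-- Pre_ excludes strings with no 'P' and no 'V': there A's max(tramos) raises ValueError
-- (and B's max over an empty generator raises ValueError too).
def Pre_costo (m : String) : Prop := 'P' ∈ m.toList ∨ 'V' ∈ m.toList
instance (m : String) : Decidable (Pre_costo m) := by unfold Pre_costo; infer_instance
def pvWitness_costo : String := "xxPy"

def Spec_costo (m : String) (out : Int) : Prop := out = costo_alt m
instance (m : String) (out : Int) : Decidable (Spec_costo m out) := by unfold Spec_costo; infer_instance

-- ===== CLAIM (what is proved, stated in full; the proofs are below) =====
def Claim_equal_costo : Prop := ∀ (m : String), Dom_costo m → Pre_costo m → Spec_costo m (costo m)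

-- ===== LEMMAS AND PROOFS =====

-- the list of completed stretch lengths, counting from a current counter t
def segLens : Int → List Char → List Int
  | _, [] => []
  | t, c :: r => if c = 'P' ∨ c = 'V' then t :: segLens 0 r else segLens (t + 1) r

-- gaps between consecutive delimiter positions, starting from a previous position
def gapsOf : Int → List Int → List Int
  | _, [] => []
  | prev, i :: r => (i - prev - 1) :: gapsOf i r

theorem foldA (l : List Char) (ts : PySem.Set Int) (t : Int) :
    (l.foldl costoStep (ts, t)).1 = (segLens t l).foldl PySem.Set.add ts := by
  induction l generalizing ts t with
  | nil => rfl
  | cons c r ih =>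
      by_cases h : c = 'P' ∨ c = 'V' <;>
        simp [costoStep, segLens, h, ih]

theorem zip_gaps (idxs : List Int) (prev : Int) :
    ((prev :: idxs).zip idxs).map (fun p => p.2 - p.1 - 1) = gapsOf prev idxs := by
  induction idxs generalizing prev with
  | nil => rfl
  | cons i r ih => simp [gapsOf, ← ih i]

theorem idx_gaps (l : List Char) (k prev : Int) :
    gapsOf prev
      (((PySem.List.enumerate l k).filter
        (fun p => p.2 == 'P' || p.2 == 'V')).map (fun p => p.1))
      = segLens (k - prev - 1) l := by
  induction l generalizing k prev with
  | nil => rfl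
  | cons c r ih =>
      rw [PySem.List.enumerate_cons, List.filter_cons]
      by_cases h : c = 'P' ∨ c = 'V'
      · have hf : ((k, c).2 == 'P' || (k, c).2 == 'V') = true := by
          rcases h with h | h <;> simp [h]
        rw [hf, if_pos rfl, List.map_cons]
        show (k - prev - 1) :: gapsOf k _ = _
        rw [segLens, if_pos h]
        have := ih (k + 1) k
        rw [show (k + 1 : Int) - k - 1 = 0 by ring] at this
        rw [this]
      · have hf : ((k, c).2 == 'P' || (k, c).2 == 'V') = false := by
          push Not at h
          simp [h.1, h.2]
        rw [hf]
        simp only [Bool.false_eq_true, if_false]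
        rw [segLens, if_neg h]
        have := ih (k + 1) prev
        rw [show (k + 1 : Int) - prev - 1 = k - prev - 1 + 1 by ring] at this
        rw [this]

theorem max?_congr_mem (xs ys : List Int) (h : ∀ a : Int, a ∈ xs ↔ a ∈ ys) :
    PySem.List.max? xs (fun x => x) = PySem.List.max? ys (fun x => x) := by
  cases hx : PySem.List.max? xs (fun x => x) with
  | none =>
      rw [PySem.List.max?_eq_none_iff] at hx
      subst hx
      cases hy : PySem.List.max? ys (fun x => x) with
      | none => rfl
      | some b =>
          have hb := PySem.List.max?_mem hy
          rw [← h] at hb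
          simp at hb
  | some a =>
      have ha := PySem.List.max?_mem hx
      cases hy : PySem.List.max? ys (fun x => x) with
      | none =>
          rw [PySem.List.max?_eq_none_iff] at hy
          rw [h] at ha
          simp [hy] at ha
      | some b =>
          have hb := PySem.List.max?_mem hy
          have h1 := PySem.List.max?_isMax hx b ((h b).mpr hb)
          have h2 := PySem.List.max?_isMax hy a ((h a).mp ha)
          simp only [Option.some.injEq]
          omega

-- ===== VERDICT (by name: the statement is the Claim_ definition above) =====
theorem costo_spec : Claim_equal_costo := by
  intro m _ _
  unfold Spec_costo costo costo_alt
  simp only []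
  have hA := foldA m.toList PySem.Set.empty 0
  have hB : (((-1 : Int) ::
        ((PySem.List.enumerate m.toList 0).filter
          (fun p => p.2 == 'P' || p.2 == 'V')).map (fun p => p.1)).zip
        (((PySem.List.enumerate m.toList 0).filter
          (fun p => p.2 == 'P' || p.2 == 'V')).map (fun p => p.1))).map
        (fun p => p.2 - p.1 - 1) = segLens 0 m.toList := by
    rw [zip_gaps]
    have := idx_gaps m.toList 0 (-1)
    simpa using this
  rw [hA, hB]
  have hmax : PySem.List.max? ((segLens 0 m.toList).foldl PySem.Set.add PySem.Set.empty) (fun x => x)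
      = PySem.List.max? (segLens 0 m.toList) (fun x => x) := by
    apply max?_congr_mem
    intro a
    have : (segLens 0 m.toList).foldl PySem.Set.add PySem.Set.empty
        = PySem.Set.ofList (segLens 0 m.toList) := (PySem.Set.ofList_eq_foldl _).symm
    rw [this, PySem.Set.mem_ofList]
  rw [hmax]
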